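-- pv_equiv track=rewrite | github.com/Detroix23/numpy_tree | src/tree_py/tree.py | last_no_blank
-- ===== SOURCE A (Python) =====
-- def last_no_blank(t: tuple[str, ...], origin: str = "Ω") -> str:
--     """
--     Return last element of tuple `t`, skiping blanks.
--     """
--     last: str = ""
--     index: int = len(t) - 1
--     while not last and index >= 0:
--         if t[index]:
--             last = t[index]
--         index -= 1
--
--     if not last:
--         last = origin
--
--     return last
-- ===== SOURCE B (Python) =====
-- def last_no_blank(t: tuple[str, ...], origin: str = "Ω") -> str:
--     """Filter-then-index: collect all non-blank elements, take the last."""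
--     nb = [x for x in t if x]
--     return nb[-1] if nb else origin
-- ===== Notes on version B (the rewrite author's own statement) =====
-- stated objective: simpler
-- what changed: Replaced the reverse index-based early-exit while loop with a forward filter of non-blank elements followed by a last-element index with origin fallback.
import Mathlib
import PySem

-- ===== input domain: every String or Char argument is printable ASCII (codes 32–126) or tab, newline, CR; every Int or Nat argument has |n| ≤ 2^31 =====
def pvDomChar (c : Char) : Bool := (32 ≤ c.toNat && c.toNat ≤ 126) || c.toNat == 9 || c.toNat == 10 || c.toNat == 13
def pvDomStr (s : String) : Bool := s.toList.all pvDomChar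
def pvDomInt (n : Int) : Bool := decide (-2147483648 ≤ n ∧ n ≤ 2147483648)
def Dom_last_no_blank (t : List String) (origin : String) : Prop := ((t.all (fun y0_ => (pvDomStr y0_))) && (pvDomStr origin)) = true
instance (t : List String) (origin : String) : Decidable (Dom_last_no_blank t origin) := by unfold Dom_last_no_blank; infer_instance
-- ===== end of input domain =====

-- B replaces A's reverse early-exit index loop by filter-then-last (simpler decomposition).

-- ===== PORT A =====
-- A's while loop: `last` stays "" until a non-blank element is found scanning
-- indices len-1 … 0; once `last` is non-blank the loop exits at its next test,
-- so the loop is the recursion below on the number of indices left to scan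
-- (argument n means index = n-1). t[index] with 0 ≤ index < len is
-- PySem.List.pyGet?; `.getD ""` only discharges the in-range access.
def lnbLoop (t : List String) : Nat → String
  | 0 => ""
  | n + 1 =>
    let x := (PySem.List.pyGet? t (n : Int)).getD ""
    if x ≠ "" then x else lnbLoop t n

def last_no_blank (t : List String) (origin : String) : String :=
  let last := lnbLoop t t.length
  if last = "" then origin else last

-- ===== PORT B =====
def last_no_blank_alt (t : List String) (origin : String) : String :=
  let nb := t.filter (fun x => x ≠ "")
  match PySem.List.pyGet? nb (-1) with
  | some v => v
  | none => origin

-- ===== PRECONDITION & SPEC =====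
def Spec_last_no_blank (t : List String) (origin : String) (out : String) : Prop := out = last_no_blank_alt t origin
instance (t : List String) (origin : String) (out : String) : Decidable (Spec_last_no_blank t origin out) := by unfold Spec_last_no_blank; infer_instance

-- ===== CLAIM (what is proved, stated in full; the proofs are below) =====
def Claim_equal_last_no_blank : Prop := ∀ (t : List String) (origin : String), Dom_last_no_blank t origin → Spec_last_no_blank t origin (last_no_blank t origin)

-- ===== LEMMAS AND PROOFS =====

-- the loop only looks at the first n elements
theorem lnbLoop_append (t : List String) (a : String) (n : Nat) (h : n ≤ t.length) :
    lnbLoop (t ++ [a]) n = lnbLoop t n := by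
  induction n with
  | zero => rfl
  | succ n ih =>
    have hn : n < t.length := h
    simp only [lnbLoop, PySem.List.pyGet?_natCast]
    rw [List.getElem?_append_left hn, ih (Nat.le_of_lt hn)]

-- characterisation of A's loop: last non-blank element, or ""
theorem lnbLoop_eq_filter_last (t : List String) :
    lnbLoop t t.length = ((t.filter (fun x => x ≠ "")).getLast?).getD "" := by
  induction t using List.reverseRecOn with
  | nil => rfl
  | append_singleton t a ih =>
    have hlen : (t ++ [a]).length = t.length + 1 := by simp
    rw [hlen]
    simp only [lnbLoop, PySem.List.pyGet?_natCast]
    rw [List.getElem?_append_right (Nat.le_refl _)]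
    simp only [Nat.sub_self, List.getElem?_cons_zero, Option.getD_some]
    by_cases ha : a = ""
    · subst ha
      simp only [ne_eq, not_true_eq_false,
        if_false]
      rw [lnbLoop_append t "" t.length (Nat.le_refl _), ih]
      simp [List.filter_append]
    · simp [List.filter_append, ha, List.getLast?_append]

theorem filter_last_ne_blank (t : List String) (v : String)
    (h : (t.filter (fun x => x ≠ "")).getLast? = some v) : v ≠ "" := by
  have hv : v ∈ t.filter (fun x => x ≠ "") := List.mem_of_getLast? h
  have := List.of_mem_filter hv
  simpa using this

-- ===== VERDICT (by name: the statement is the Claim_ definition above) =====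
theorem last_no_blank_spec : Claim_equal_last_no_blank := by
  intro t origin _
  unfold Spec_last_no_blank last_no_blank last_no_blank_alt
  simp only []
  rw [show (PySem.List.pyGet? (t.filter (fun x => x ≠ "")) (-1)) = (t.filter (fun x => x ≠ "")).getLast? from PySem.List.pyGet?_neg_one _, lnbLoop_eq_filter_last]
  cases h : (t.filter (fun x => x ≠ "")).getLast? with
  | none => simp
  | some v =>
    have := filter_last_ne_blank t v h
    simp [this]
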